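-- pv_equiv track=rewrite | github.com/Arsen1302/Code-copy-detector | TestData/solutions/problem_1664_3.py | solution_1664_3
-- ===== SOURCE A (Python) =====
-- def solution_1664_3(s: str) -> int:
--     dict1={}
--     res=1
--     for i,c in enumerate(s):
--         if dict1.get(c,None) is None:
--             dict1[c]=c
--         else:
--             dict1={c:c}
--             res+=1
--     return res
-- ===== SOURCE B (Python) =====
-- def solution_1664_3(s: str) -> int:
--     # Pass 1: previous-occurrence index of each character (dict never reset).
--     last = {}
--     prev = []
--     for i, c in enumerate(s):
--         prev.append(last.get(c, -1))
--         last[c] = i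
--     # Pass 2: over integers only. A cut happens at i exactly when the previous
--     # occurrence of s[i] lies inside the current partition (prev[i] >= start).
--     res = 1
--     start = 0
--     for i, p in enumerate(prev):
--         if p >= start:
--             res += 1
--             start = i
--     return res
-- ===== Notes on version B (the rewrite author's own statement) =====
-- stated objective: alternative
-- what changed: Replaces A's reset-on-repeat hash map with two staged passes: first a never-reset last-seen dict builds a previous-occurrence index array, then a pure integer scan counts cuts where prev[i] >= current partition start.
import Mathlib
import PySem

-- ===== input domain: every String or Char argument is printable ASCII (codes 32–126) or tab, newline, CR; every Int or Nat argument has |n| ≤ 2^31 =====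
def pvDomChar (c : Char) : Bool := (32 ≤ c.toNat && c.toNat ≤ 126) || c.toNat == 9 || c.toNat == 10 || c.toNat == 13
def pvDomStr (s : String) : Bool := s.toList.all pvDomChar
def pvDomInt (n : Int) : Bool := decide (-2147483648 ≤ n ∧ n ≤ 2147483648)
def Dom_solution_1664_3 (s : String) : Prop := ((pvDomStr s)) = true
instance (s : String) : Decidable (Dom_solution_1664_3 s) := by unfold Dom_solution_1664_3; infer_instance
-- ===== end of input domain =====

-- B replaces A's reset-on-repeat dict with two staged passes: a never-reset
-- last-seen dict builds a previous-occurrence array, then a pure integer scan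
-- counts cuts; alternative algorithm, same asymptotic cost.


-- ===== PORT A =====
-- one loop iteration of A: dict lookup, insert, or reset to {c:c} with res+1
def stepA (st : PySem.Dict Char Char × Int) (ic : Int × Char) : PySem.Dict Char Char × Int :=
  if (st.1.get? ic.2).isNone then (st.1.insert ic.2 ic.2, st.2)
  else (PySem.Dict.ofList [(ic.2, ic.2)], st.2 + 1)

def solution_1664_3 (s : String) : Int :=
  ((PySem.List.enumerate s.toList 0).foldl stepA (PySem.Dict.empty, 1)).2

-- ===== PORT B =====
-- pass 1 iteration: prev.append(last.get(c, -1)); last[c] = i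
def step1 (st : List Int × PySem.Dict Char Int) (ic : Int × Char) : List Int × PySem.Dict Char Int :=
  (st.1 ++ [st.2.getD ic.2 (-1)], st.2.insert ic.2 ic.1)

-- pass 2 iteration: if p >= start: res += 1; start = i
def step2 (st : Int × Int) (ip : Int × Int) : Int × Int :=
  if st.2 ≤ ip.2 then (st.1 + 1, ip.1) else st

def solution_1664_3_alt (s : String) : Int :=
  let prev := ((PySem.List.enumerate s.toList 0).foldl step1 ([], PySem.Dict.empty)).1
  ((PySem.List.enumerate prev 0).foldl step2 (1, 0)).1

-- ===== PRECONDITION & SPEC =====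
def Spec_solution_1664_3 (s : String) (out : Int) : Prop := out = solution_1664_3_alt s
instance (s : String) (out : Int) : Decidable (Spec_solution_1664_3 s out) := by unfold Spec_solution_1664_3; infer_instance

-- ===== CLAIM =====
def Claim_equal_solution_1664_3 : Prop := ∀ (s : String), Dom_solution_1664_3 s → Spec_solution_1664_3 s (solution_1664_3 s)

-- ===== LEMMAS AND PROOFS =====

-- the last index j < k with l[j] = c (proof-side specification of B's `last` dict)
def lastIdx (l : List Char) (c : Char) : Nat → Option Int
  | 0 => none
  | (k+1) => if l[k]? = some c then some (k : Int) else lastIdx l c k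

-- proof-side value of B's prev[i]
def prevOf (l : List Char) (i : Nat) : Int :=
  match l[i]? with
  | some c => (lastIdx l c i).getD (-1)
  | none => 0

lemma lastIdx_succ (l : List Char) (c : Char) (k : Nat) :
    lastIdx l c (k + 1) = if l[k]? = some c then some (k : Int) else lastIdx l c k := rfl

lemma prevOf_eq (l : List Char) (i : Nat) (c : Char) (h : l[i]? = some c) :
    prevOf l i = (lastIdx l c i).getD (-1) := by simp [prevOf, h]

lemma lastIdx_some (l : List Char) (c : Char) :
    ∀ (k : Nat) (p : Int), lastIdx l c k = some p →
    ∃ j : Nat, p = (j : Int) ∧ j < k ∧ l[j]? = some c := by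
  intro k
  induction k with
  | zero => intro p h; simp [lastIdx] at h
  | succ k ih =>
    intro p h
    unfold lastIdx at h
    split at h
    · exact ⟨k, (Option.some.inj h).symm, by omega, ‹_›⟩
    · obtain ⟨j, hj1, hj2, hj3⟩ := ih p h
      exact ⟨j, hj1, by omega, hj3⟩

lemma lastIdx_ge (l : List Char) (c : Char) :
    ∀ (k j : Nat), j < k → l[j]? = some c →
    ∃ p : Int, lastIdx l c k = some p ∧ (j : Int) ≤ p := by
  intro k
  induction k with
  | zero => intro j h; omega
  | succ k ih =>
    intro j hj hjc
    unfold lastIdx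
    by_cases hk : l[k]? = some c
    · exact ⟨(k : Int), by simp [hk], by exact_mod_cast Nat.lt_succ_iff.mp hj⟩
    · have hjk : j < k := by
        rcases Nat.lt_succ_iff_lt_or_eq.mp hj with h | h
        · exact h
        · subst h; exact absurd hjc hk
      obtain ⟨p, hp1, hp2⟩ := ih j hjk hjc
      exact ⟨p, by simp [hk, hp1], hp2⟩

-- membership in the current window as an index condition
lemma mem_window_iff (l : List Char) (c : Char) (st k : Nat) (hst : st ≤ k) :
    c ∈ (l.drop st).take (k - st) ↔ ∃ j : Nat, st ≤ j ∧ j < k ∧ l[j]? = some c := by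
  rw [List.mem_iff_getElem?]
  constructor
  · rintro ⟨m, hm⟩
    rw [List.getElem?_take] at hm
    split at hm
    · rw [List.getElem?_drop] at hm
      exact ⟨st + m, by omega, by omega, hm⟩
    · simp at hm
  · rintro ⟨j, hj1, hj2, hj3⟩
    refine ⟨j - st, ?_⟩
    rw [List.getElem?_take, if_pos (by omega), List.getElem?_drop,
      show st + (j - st) = j by omega]
    exact hj3

-- the pivot: A's repeat test equals B's integer comparison
lemma window_iff_prev (l : List Char) (c : Char) (st k : Nat) (hst : st ≤ k)
    (hk : l[k]? = some c) :
    c ∈ (l.drop st).take (k - st) ↔ (st : Int) ≤ prevOf l k := by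
  rw [mem_window_iff l c st k hst, prevOf_eq l k c hk]
  constructor
  · rintro ⟨j, hj1, hj2, hj3⟩
    obtain ⟨p, hp1, hp2⟩ := lastIdx_ge l c k j hj2 hj3
    rw [hp1]
    simp only [Option.getD_some]
    have : (st : Int) ≤ (j : Int) := by exact_mod_cast hj1
    omega
  · intro h
    cases hli : lastIdx l c k with
    | none => rw [hli] at h; simp at h; omega
    | some p =>
      rw [hli] at h
      simp only [Option.getD_some] at h
      obtain ⟨j, hj1, hj2, hj3⟩ := lastIdx_some l c k p hli
      refine ⟨j, ?_, hj2, hj3⟩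
      rw [hj1] at h
      exact_mod_cast h

-- pass 1 computes the prevOf values
lemma pass1_eq (l : List Char) :
    ∀ (rest : List Char) (k : Nat) (acc : List Int) (d : PySem.Dict Char Int),
    rest = l.drop k →
    (∀ c, d.get? c = lastIdx l c k) →
    ((PySem.List.enumerate rest (k : Int)).foldl step1 (acc, d)).1
      = acc ++ (List.range' k rest.length).map (prevOf l) := by
  intro rest
  induction rest with
  | nil => intro k acc d _ _; simp [PySem.List.enumerate]
  | cons c cs ih =>
    intro k acc d hrest hd
    have hck : l[k]? = some c := by
      have : (l.drop k)[0]? = some c := by rw [← hrest]; rfl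
      simpa using this
    have hcs : cs = l.drop (k + 1) := by
      have h1 : l.drop (k+1) = (l.drop k).tail := by
        rw [← List.drop_drop]; simp
      rw [h1, ← hrest]; rfl
    rw [PySem.List.enumerate_cons]
    simp only [List.foldl_cons, step1]
    have hv : d.getD c (-1) = prevOf l k := by
      rw [PySem.Dict.getD_eq_get?_getD, hd c, prevOf_eq l k c hck]
    have hd' : ∀ x, (d.insert c (k : Int)).get? x = lastIdx l x (k + 1) := by
      intro x
      by_cases hx : x = c
      · subst hx
        rw [PySem.Dict.get?_insert_self, lastIdx_succ, if_pos hck]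
      · rw [PySem.Dict.get?_insert_of_ne d _ hx, hd x, lastIdx_succ,
          if_neg (by rw [hck]; simp [hx, Ne.symm])]
    have := ih (k+1) (acc ++ [d.getD c (-1)]) (d.insert c (k : Int))
      (by exact_mod_cast hcs) hd'
    push_cast at this ⊢
    rw [this, hv]
    simp only [List.length_cons, List.range'_succ, List.map_cons]
    simp

-- main loop invariant: A's fold equals B's pass-2 fold over the prevOf values
lemma loop_eq (l : List Char) :
    ∀ (rest : List Char) (k st : Nat) (d : PySem.Dict Char Char) (res : Int),
    rest = l.drop k → st ≤ k →
    (∀ c, (d.get? c).isSome = decide (c ∈ (l.drop st).take (k - st))) →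
    ((PySem.List.enumerate rest (k : Int)).foldl stepA (d, res)).2
      = ((PySem.List.enumerate ((List.range' k rest.length).map (prevOf l)) (k : Int)).foldl
          step2 (res, (st : Int))).1 := by
  intro rest
  induction rest with
  | nil => intro k st d res _ _ _; simp [PySem.List.enumerate]
  | cons c cs ih =>
    intro k st d res hrest hst hd
    have hck : l[k]? = some c := by
      have : (l.drop k)[0]? = some c := by rw [← hrest]; rfl
      simpa using this
    have hcs : cs = l.drop (k + 1) := by
      have h1 : l.drop (k+1) = (l.drop k).tail := by
        rw [← List.drop_drop]; simp
      rw [h1, ← hrest]; rfl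
    have hwin : (l.drop st).take (k + 1 - st) = (l.drop st).take (k - st) ++ [c] := by
      have h2 : (l.drop st)[k - st]? = some c := by
        rw [List.getElem?_drop]
        rwa [Nat.add_sub_cancel' hst]
      rw [show k + 1 - st = (k - st) + 1 by omega, List.take_add_one, h2]
      rfl
    simp only [List.length_cons, List.range'_succ, List.map_cons]
    rw [PySem.List.enumerate_cons, PySem.List.enumerate_cons]
    simp only [List.foldl_cons]
    by_cases hmem : c ∈ (l.drop st).take (k - st)
    · -- repeated char: A resets the dict, B's prev[k] ≥ start fires a cut
      have hA : (d.get? c).isSome = true := by rw [hd]; simpa using hmem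
      have hB : (st : Int) ≤ prevOf l k := (window_iff_prev l c st k hst hck).mp hmem
      have hne : d.get? c ≠ none := Option.isSome_iff_ne_none.mp (by rw [hA])
      simp only [stepA, step2, Option.isNone_iff_eq_none]
      rw [if_neg hne, if_pos hB]
      have hofl : PySem.Dict.ofList [(c, c)] = (PySem.Dict.empty : PySem.Dict Char Char).insert c c := by rfl
      have := ih (k+1) k (PySem.Dict.ofList [(c, c)]) (res + 1) (by exact_mod_cast hcs) (by omega)
        (by
          intro x
          have hg : ((PySem.Dict.ofList [(c, c)]).get? x).isSome = decide (x = c) := by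
            rw [hofl]
            by_cases hx : x = c
            · subst hx; simp [PySem.Dict.get?_insert_self]
            · rw [PySem.Dict.get?_insert_of_ne _ c hx]
              simp [PySem.Dict.get?_empty, hx]
          rw [hg]
          have hw : (l.drop k).take 1 = [c] := by rw [← hrest]; rfl
          simp [show k + 1 - k = 1 by omega, hw])
      push_cast at this ⊢
      exact this
    · -- new char: A inserts, B's prev[k] < start, both states extend the window
      have hA : (d.get? c).isSome = false := by rw [hd]; simpa using hmem
      have hB : ¬ (st : Int) ≤ prevOf l k := fun h =>
        hmem ((window_iff_prev l c st k hst hck).mpr h)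
      have hnone : d.get? c = none := Option.not_isSome_iff_eq_none.mp (by rw [hA]; simp)
      simp only [stepA, step2, Option.isNone_iff_eq_none]
      rw [if_pos hnone, if_neg hB]
      have := ih (k+1) st (d.insert c c) res (by exact_mod_cast hcs) (by omega)
        (by
          intro x
          rw [hwin]
          by_cases hx : x = c
          · subst hx; simp [PySem.Dict.get?_insert_self]
          · rw [PySem.Dict.get?_insert_of_ne d c hx, hd]
            simp [hx])
      push_cast at this ⊢
      exact this

-- ===== VERDICT =====
theorem solution_1664_3_spec : Claim_equal_solution_1664_3 := by
  intro s _
  unfold Spec_solution_1664_3 solution_1664_3 solution_1664_3_alt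
  have hp := pass1_eq s.toList s.toList 0 [] PySem.Dict.empty (by simp)
    (by intro c; simp [PySem.Dict.get?_empty, lastIdx])
  have hl := loop_eq s.toList s.toList 0 0 PySem.Dict.empty 1 (by simp) (le_refl 0)
    (by intro c; simp [PySem.Dict.get?_empty])
  simp only [Nat.cast_zero] at hp hl
  simp only [hp]
  simpa using hl
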